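-- pv_equiv track=rewrite | github.com/ggramgyo/PS_STUDY | programmers/최고의 집합.py | solution
-- ===== SOURCE A (Python) =====
-- def solution(n, s):
--     if n > s:
--         return [-1]
--     m = s // n
--     answer = [m for _ in range(n)]
--     start, ix = m * n, n-1
--     while start != s:
--         answer[ix] += 1
--         ix = n-1 if ix == 0 else ix - 1
--         start += 1
--     return answer
-- ===== SOURCE B (Python) =====
-- def solution(n, s):
--     if n > s:
--         return [-1]
--     m, r = divmod(s, n)
--     return [m] * (n - r) + [m + 1] * r
-- ===== Notes on version B (the rewrite author's own statement) =====
-- stated objective: simpler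
-- what changed: Replaces A's one-at-a-time backward-increment while-loop over the answer list with a single divmod and the closed-form construction [m]*(n-r) + [m+1]*r.
import Mathlib
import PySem

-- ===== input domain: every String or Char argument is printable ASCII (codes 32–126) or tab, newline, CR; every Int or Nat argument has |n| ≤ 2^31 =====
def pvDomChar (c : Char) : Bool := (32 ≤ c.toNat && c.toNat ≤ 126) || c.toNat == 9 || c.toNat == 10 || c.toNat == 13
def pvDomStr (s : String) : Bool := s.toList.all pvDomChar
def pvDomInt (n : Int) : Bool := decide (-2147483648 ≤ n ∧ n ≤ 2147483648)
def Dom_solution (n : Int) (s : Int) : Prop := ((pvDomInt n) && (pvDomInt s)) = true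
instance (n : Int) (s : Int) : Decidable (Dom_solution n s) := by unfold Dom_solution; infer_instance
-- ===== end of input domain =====

-- B replaces A's one-by-one backward-increment while-loop with the closed-form construction
-- [m]*(n-r) + [m+1]*r (divmod once, no loop): simpler.


-- ===== PORT A =====
-- The Python while-loop increments 'start' by 1 until start == s, so (when it terminates
-- normally) it runs exactly (s - start₀).toNat iterations; that count is the fuel here.
-- answer[ix] += 1 uses PySem.List.pySetD/pyGetD (ix is nonnegative whenever the loop runs
-- inside Pre_, and Python's IndexError cases lie outside Pre_).
def solutionLoopA (n : Int) : Nat → List Int → Int → List Int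
  | 0, answer, _ => answer
  | k + 1, answer, ix =>
    let answer := PySem.List.pySetD answer ix (PySem.List.pyGetD answer ix 0 + 1)
    solutionLoopA n k answer (if ix == 0 then n - 1 else ix - 1)

def solution (n : Int) (s : Int) : List Int :=
  if n > s then [-1]
  else
    let m := PySem.Int.floordiv s n
    let answer := (PySem.List.pyRange 0 n 1).map (fun _ => m)
    let start := m * n
    solutionLoopA n (s - start).toNat answer (n - 1)

-- ===== PORT B =====
def solution_alt (n : Int) (s : Int) : List Int :=
  if n > s then [-1]
  else
    let m := PySem.Int.floordiv s n
    let r := PySem.Int.mod s n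
    PySem.List.pyRepeat [m] (n - r) ++ PySem.List.pyRepeat [m + 1] r

-- ===== PRECONDITION & SPEC =====
-- Pre_ excludes exactly the inputs where Python A raises: n = 0 with n ≤ s (ZeroDivisionError)
-- and n < 0 with n ≤ s and n ∤ s (IndexError on the empty answer list); A returns on all
-- admitted inputs, so Pre_ throws away nothing A returns on.
def Pre_solution (n : Int) (s : Int) : Prop :=
  s < n ∨ (n ≠ 0 ∧ (0 < n ∨ PySem.Int.mod s n = 0))
instance (n : Int) (s : Int) : Decidable (Pre_solution n s) := by unfold Pre_solution; infer_instance
def pvWitness_solution : Int × Int := (3, 11)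
def Spec_solution (n : Int) (s : Int) (out : List Int) : Prop := out = solution_alt n s
instance (n : Int) (s : Int) (out : List Int) : Decidable (Spec_solution n s out) := by unfold Spec_solution; infer_instance

-- ===== CLAIM (what is proved, stated in full; the proofs are below) =====
def Claim_equal_solution : Prop := ∀ (n : Int) (s : Int), Dom_solution n s → Pre_solution n s → Spec_solution n s (solution n s)

-- ===== LEMMAS AND PROOFS =====

-- Invariant of A's loop: with k ≤ a increments left and ix = a - 1 pointing at the last m,
-- each step turns one m (at the block boundary) into m+1 and moves ix left.
theorem solutionLoopA_inv (n m : Int) (k a b : Nat) (h : k ≤ a) :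
    solutionLoopA n k (List.replicate a m ++ List.replicate b (m + 1)) ((a : Int) - 1)
      = List.replicate (a - k) m ++ List.replicate (b + k) (m + 1) := by
  induction k generalizing a b with
  | zero => simp [solutionLoopA]
  | succ k ih =>
    have ha : 1 ≤ a := le_trans (Nat.succ_le_succ (Nat.zero_le _)) h
    rw [solutionLoopA]
    have hix : (a : Int) - 1 = ((a - 1 : Nat) : Int) := by push_cast [ha]; ring
    have hlen : (a - 1 : Nat) < (List.replicate a m ++ List.replicate b (m + 1)).length := by
      simp; omega
    have hget : PySem.List.pyGetD (List.replicate a m ++ List.replicate b (m + 1)) ((a : Int) - 1) 0 = m := by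
      rw [hix, PySem.List.pyGetD_natCast]
      rw [List.getD_eq_getElem _ _ hlen, List.getElem_append_left (by simp; omega)]
      simp
    have hset : PySem.List.pySetD (List.replicate a m ++ List.replicate b (m + 1)) ((a : Int) - 1) (m + 1)
        = List.replicate (a - 1) m ++ List.replicate (b + 1) (m + 1) := by
      rw [hix, PySem.List.pySetD_natCast]
      have hsplit : List.replicate a m = List.replicate (a - 1) m ++ [m] := by
        conv_lhs => rw [show a = (a - 1) + 1 by omega]
        exact List.replicate_succ' ..
      rw [hsplit, List.append_assoc, List.set_append_right _ _ (by simp)]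
      simp only [List.length_replicate]
      rw [show a - 1 - (a - 1) = 0 by omega]
      simp [List.replicate_succ]
    rw [hget, hset]
    by_cases hk : k = 0
    · subst hk
      rw [solutionLoopA]
    · have hif : (if ((a : Int) - 1) == 0 then n - 1 else (a : Int) - 1 - 1)
          = ((a - 1 : Nat) : Int) - 1 := by
        have h0 : ¬ ((a : Int) - 1 = 0) := by omega
        simp only [beq_iff_eq, if_neg h0]
        omega
      rw [hif, ih (a - 1) (b + 1) (by omega)]
      have e1 : a - 1 - k = a - (k + 1) := by omega
      have e2 : b + 1 + k = b + (k + 1) := by omega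
      rw [e1, e2]

-- A's initial comprehension [m for _ in range(n)] is n.toNat copies of m.
theorem initial_replicate (n m : Int) :
    (PySem.List.pyRange 0 n 1).map (fun _ => m) = List.replicate n.toNat m := by
  rw [List.map_const', PySem.List.length_pyRange_one]
  simp

-- ===== VERDICT (by name: the statement is the Claim_ definition above) =====
theorem solution_spec : Claim_equal_solution := by
  intro n s _ hpre
  unfold Spec_solution solution solution_alt
  by_cases hns : n > s
  · simp [hns]
  · simp only [hns, if_false]
    have hn : n ≠ 0 := by
      rcases hpre with h | ⟨h, _⟩; · omega
      · exact h
    have hid := PySem.Int.floordiv_mul_add_mod s n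
    set m := PySem.Int.floordiv s n with hm
    set r := PySem.Int.mod s n with hr
    rcases lt_trichotomy n 0 with hneg | hzero | hpos
    · -- n < 0 and (from Pre_) r = 0: zero loop iterations, both sides are []
      have hr0 : r = 0 := by
        rcases hpre with h | ⟨_, h | h⟩ <;> omega
      have hfuel : (s - m * n).toNat = 0 := by
        have : m * n = s := by omega
        simp [this]
      rw [hfuel, initial_replicate]
      rw [solutionLoopA]
      have hnt : n.toNat = 0 := by omega
      have h1 : (n - r).toNat = 0 := by omega
      have h2 : r.toNat = 0 := by omega
      simp [PySem.List.pyRepeat_singleton, hnt, h1, h2]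
    · exact absurd hzero hn
    · -- n > 0: r = s - m*n iterations turn the last r copies of m into m+1
      have hrlt : r < n := PySem.Int.mod_lt s hpos
      have hrnn : 0 ≤ r := PySem.Int.mod_nonneg s hpos
      have hfuel : (s - m * n).toNat = r.toNat := by omega
      rw [hfuel, initial_replicate]
      have hcast : n - 1 = ((n.toNat : Int)) - 1 := by omega
      have hinit : List.replicate n.toNat m
          = List.replicate n.toNat m ++ List.replicate 0 (m + 1) := by simp
      conv_lhs => rw [hcast, hinit]
      rw [solutionLoopA_inv n m r.toNat n.toNat 0 (by omega)]
      rw [PySem.List.pyRepeat_singleton, PySem.List.pyRepeat_singleton]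
      have e1 : (n - r).toNat = n.toNat - r.toNat := by omega
      simp [e1]
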